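-- pv_equiv track=rewrite | github.com/taxata/python_c_class | C_151_08_Vowels_in_a_word.py | maxVowelsWord
-- ===== SOURCE A (Python) =====
-- vowels = 'aoieyu'
--
-- def countVowels(word):
--     count = 0
--     for letter in word :
--         if letter.lower() in vowels :
--             count += 1
--     return count
--
-- def maxVowelsWord(words):
--     xmax = 0
--     xword = ''
--     for word in words :
--         vowels = countVowels(word)
--         if vowels > xmax :
--             xmax = vowels
--             xword = word
--     return xword, xmax
-- ===== SOURCE B (Python) =====
-- vowels = 'aoieyu'
--
-- def countVowels(word):
--     return len([letter for letter in word if letter.lower() in vowels])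
--
-- def maxVowelsWord(words):
--     counts = [countVowels(w) for w in words]
--     xmax = max(counts) if counts else 0
--     if xmax == 0:
--         return '', 0
--     return words[counts.index(xmax)], xmax
-- ===== Notes on version B (the rewrite author's own statement) =====
-- stated objective: alternative
-- what changed: Replaces A's single running-max accumulator loop by a build-the-counts-table-then-select decomposition (map countVowels, take max, re-index with .index for the first-occurrence tie-break; '' and 0 when the max is 0), and computes countVowels as the length of a filtered list instead of an if-counter loop.
import Mathlib
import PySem

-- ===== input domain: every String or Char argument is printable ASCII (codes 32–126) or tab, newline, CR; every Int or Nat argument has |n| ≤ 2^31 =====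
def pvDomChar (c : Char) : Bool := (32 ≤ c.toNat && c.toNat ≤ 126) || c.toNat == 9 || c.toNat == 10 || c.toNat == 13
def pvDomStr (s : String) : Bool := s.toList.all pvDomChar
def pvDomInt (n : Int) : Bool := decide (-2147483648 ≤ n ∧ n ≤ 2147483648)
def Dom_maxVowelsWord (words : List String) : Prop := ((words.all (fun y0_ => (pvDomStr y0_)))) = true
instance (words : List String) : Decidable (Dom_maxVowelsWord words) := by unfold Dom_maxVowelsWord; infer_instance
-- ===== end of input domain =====

-- B replaces A's running-max loop by a build-counts-table-then-select decomposition (same cost); no speed claimed.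

-- ===== PORT A =====
-- 'letter.lower() in vowels' on a one-character string = lowered char is a member of the vowel chars (exact)
def countVowels (word : String) : Int :=
  word.toList.foldl
    (fun count letter => if PySem.Chars.lowerChar letter ∈ "aoieyu".toList then count + 1 else count) 0

def maxVowelsWord (words : List String) : String × Int :=
  let r := words.foldl
    (fun (acc : Int × String) word =>
      let v := countVowels word
      if v > acc.1 then (v, word) else acc) (0, "")
  (r.2, r.1)

-- ===== PORT B =====
def countVowels_alt (word : String) : Int :=
  ((word.toList.filter (fun letter => PySem.Chars.lowerChar letter ∈ "aoieyu".toList)).length : Int)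

def maxVowelsWord_alt (words : List String) : String × Int :=
  let counts := words.map countVowels_alt
  match PySem.List.max? counts (fun x => x) with
  | none => ("", 0)                     -- counts empty
  | some xmax =>
    if xmax = 0 then ("", 0)
    else
      match PySem.List.index? counts xmax with
      | none => ("", 0)                 -- unreachable: xmax ∈ counts
      | some i => ((PySem.List.pyGet? words (i : Int)).getD "", xmax)

-- ===== PRECONDITION & SPEC =====
def Spec_maxVowelsWord (words : List String) (out : String × Int) : Prop := out = maxVowelsWord_alt words
instance (words : List String) (out : String × Int) : Decidable (Spec_maxVowelsWord words out) := by unfold Spec_maxVowelsWord; infer_instance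

-- ===== CLAIM (what is proved, stated in full; the proofs are below) =====
def Claim_equal_maxVowelsWord : Prop := ∀ (words : List String), Dom_maxVowelsWord words → Spec_maxVowelsWord words (maxVowelsWord words)

-- ===== LEMMAS AND PROOFS =====

theorem cv_eq (word : String) : countVowels word = countVowels_alt word := by
  unfold countVowels countVowels_alt
  have h : ∀ (l : List Char) (a : Int),
      l.foldl (fun count letter => if PySem.Chars.lowerChar letter ∈ "aoieyu".toList then count + 1 else count) a
        = a + ((l.filter (fun letter => PySem.Chars.lowerChar letter ∈ "aoieyu".toList)).length : Int) := by
    intro l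
    induction l with
    | nil => simp
    | cons c t ih =>
      intro a
      by_cases hc : PySem.Chars.lowerChar c ∈ "aoieyu".toList
      · rw [List.foldl_cons, if_pos hc, ih, List.filter_cons_of_pos (by simpa using hc)]
        simp only [List.length_cons]; push_cast; ring
      · rw [List.foldl_cons, if_neg hc, ih, List.filter_cons_of_neg (by simpa using hc)]
  simpa using h word.toList 0

theorem cv_nonneg (word : String) : 0 ≤ countVowels_alt word := by
  unfold countVowels_alt; positivity

theorem foldl_max_mem (t : List Int) (x : Int) : t.foldl max x = x ∨ t.foldl max x ∈ t := by
  induction t generalizing x with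
  | nil => left; rfl
  | cons c t ih =>
    rcases ih (max x c) with h | h
    · rw [List.foldl_cons, h]
      rcases max_choice x c with h' | h'
      · left; exact h'
      · right; simp [h']
    · right; simp [List.foldl_cons, h]

theorem le_foldl_max (t : List Int) (x : Int) : x ≤ t.foldl max x := by
  induction t generalizing x with
  | nil => simp
  | cons c t ih => exact le_trans (le_max_left x c) (ih (max x c))

-- A's loop computes the running max and the first word attaining it (when it beats the start value).
theorem loop_char (ws : List String) (m0 : Int) (w0 : String) :
    ws.foldl (fun (acc : Int × String) word =>
        if countVowels_alt word > acc.1 then (countVowels_alt word, word) else acc) (m0, w0)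
      = (let M := (ws.map countVowels_alt).foldl max m0;
         if m0 < M then (M, ((ws.find? (fun w => countVowels_alt w == M)).getD ""))
         else (m0, w0)) := by
  induction ws generalizing m0 w0 with
  | nil => simp
  | cons w t ih =>
    simp only [List.foldl_cons, List.map_cons]
    by_cases h : countVowels_alt w > m0
    · rw [if_pos h, ih (countVowels_alt w) w]
      have hm : max m0 (countVowels_alt w) = countVowels_alt w := max_eq_right (le_of_lt h)
      simp only [hm]
      set M := (t.map countVowels_alt).foldl max (countVowels_alt w) with hM
      have hcvM : countVowels_alt w ≤ M := le_foldl_max _ _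
      by_cases h2 : countVowels_alt w < M
      · rw [if_pos h2, if_pos (lt_trans h h2)]
        have hne : ¬ (countVowels_alt w == M) = true := by simp [ne_of_lt h2]
        rw [List.find?_cons_of_neg (p := fun w => countVowels_alt w == M) (a := w) (l := t) hne]
      · have hMe : M = countVowels_alt w := le_antisymm (not_lt.mp h2) hcvM
        rw [if_neg h2, if_pos (hMe ▸ h)]
        have hp : (countVowels_alt w == M) = true := by simp [hMe]
        rw [List.find?_cons_of_pos (p := fun w => countVowels_alt w == M) (a := w) (l := t) hp]
        simp [hMe]
    · rw [if_neg h, ih m0 w0]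
      have hm : max m0 (countVowels_alt w) = m0 := max_eq_left (not_lt.mp h)
      simp only [hm]
      set M := (t.map countVowels_alt).foldl max m0 with hM
      by_cases h2 : m0 < M
      · rw [if_pos h2, if_pos h2]
        have hne : ¬ (countVowels_alt w == M) = true := by
          simp only [beq_iff_eq]
          exact ne_of_lt (lt_of_le_of_lt (not_lt.mp h) h2)
        rw [List.find?_cons_of_neg (p := fun w => countVowels_alt w == M) (a := w) (l := t) hne]
      · rw [if_neg h2, if_neg h2]

-- first index of M in the counts table points at the first word whose count is M
theorem index_find (ws : List String) (M : Int) (h : M ∈ ws.map countVowels_alt) :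
    ∃ i, PySem.List.index? (ws.map countVowels_alt) M = some i ∧
      ws[i]? = ws.find? (fun w => countVowels_alt w == M) := by
  induction ws with
  | nil => simp at h
  | cons w t ih =>
    by_cases hw : countVowels_alt w = M
    · refine ⟨0, ?_, ?_⟩
      · rw [List.map_cons, hw]; exact PySem.List.index?_cons_self M (t.map countVowels_alt)
      · rw [List.find?_cons_of_pos (p := fun w => countVowels_alt w == M) (a := w) (l := t) (by simp [hw])]; rfl
    · have h' : M ∈ t.map countVowels_alt := by
        rcases List.mem_map.mp h with ⟨x, hx, hxe⟩
        rcases List.mem_cons.mp hx with rfl | hx'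
        · exact absurd hxe hw
        · exact List.mem_map.mpr ⟨x, hx', hxe⟩
      rcases ih h' with ⟨i, hi, hg⟩
      refine ⟨i + 1, ?_, ?_⟩
      · rw [List.map_cons, PySem.List.index?_cons_of_ne _ hw, hi]; rfl
      · rw [List.find?_cons_of_neg (p := fun w => countVowels_alt w == M) (a := w) (l := t) (by simp [hw])]
        simpa using hg

-- ===== VERDICT (by name: the statement is the Claim_ definition above) =====
theorem maxVowelsWord_spec : Claim_equal_maxVowelsWord := by
  intro words _
  have hfun : countVowels = countVowels_alt := funext cv_eq
  unfold Spec_maxVowelsWord maxVowelsWord maxVowelsWord_alt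
  simp only [hfun]
  rw [loop_char]
  cases words with
  | nil => rfl
  | cons w t =>
    rw [List.map_cons, List.foldl_cons, PySem.List.max?_id_cons]
    have h0 : max 0 (countVowels_alt w) = countVowels_alt w := max_eq_right (cv_nonneg w)
    rw [h0]
    set M := (t.map countVowels_alt).foldl max (countVowels_alt w) with hM
    have hMnn : 0 ≤ M := le_trans (cv_nonneg w) (le_foldl_max _ _)
    have hmem : M ∈ (w :: t).map countVowels_alt := by
      rcases foldl_max_mem (t.map countVowels_alt) (countVowels_alt w) with h | h
      · rw [List.map_cons, hM, h]; exact List.mem_cons_self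
      · rw [List.map_cons]; exact List.mem_cons_of_mem _ h
    simp only []
    by_cases hz : M = 0
    · rw [if_pos hz, if_neg (by omega : ¬ (0:Int) < M)]
    · have hpos : 0 < M := lt_of_le_of_ne hMnn (Ne.symm hz)
      rw [if_neg hz, if_pos hpos]
      rcases index_find (w :: t) M hmem with ⟨i, hi, hg⟩
      rw [List.map_cons] at hi
      rw [hi]
      simp only [PySem.List.pyGet?_natCast, hg]
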